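-- pv_equiv track=rewrite | github.com/TAMUsquirrel/ProperSentenceCase | ProperSentenceCase_1.1.1-works.py | title_triwise_front_capper
-- ===== SOURCE A (Python) =====
-- from itertools import pairwise, tee, zip_longest
--
-- List_of_Single_Word_Titles = ['agent', 'brother', 'cantor', 'captain', 'chairperson', 'chancellor', 'chef', 'chief', 'commissioner', 'dame', 'dean', 'deputy', 'detective', 'director', 'doctor', 'father', 'governor', 'judge', 'king', 'queen', 'prince', 'princess', 'czar', 'lady', 'laird', 'lieutenant', 'lord', 'madame', 'master', 'miss', 'officer', 'pastor', 'president', 'principal', 'professor', 'provost', 'rabbi', 'rector', 'regent', 'reverend', 'sensei', 'sheriff', 'sister', 'student', 'trainer', 'warden']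
--
-- def triwise(iterable):
--     a, b = tee(iterable)
--     a, c = tee(iterable)
--     next(b, None)
--     next(c, None)
--     next(c, None)
--     return zip(a, b, c)
--
-- def title_triwise_front_capper(NLP_Dict, input_text):
--     output_document = ''
--     for sentence in NLP_Dict:
--         for word1, word2, word3 in triwise(sentence):
--             word1_start, word1_end = int(word1['start_char']), int(word1['end_char'])
--             word1_location = input_text[word1_start:word1_end]
--             space_between_word1_word2 = (int(word2['start_char'])-int(word1['end_char']))*' '
--             if word1['text'] in List_of_Single_Word_Titles and word2['text'] in ['of'] and word3['upos'] in ['PROPN', 'NOUN']: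
--                 output_document += word1_location.title()+(space_between_word1_word2)
--             else:
--                 output_document += word1_location+(space_between_word1_word2)
--         else:
--             try:
--                 output_document += input_text[int(sentence[-2]['start_char']):int(sentence[-2]['end_char'])]+((int(sentence[-1]['start_char'])-int(sentence[-2]['end_char']))*' ')
--             except IndexError:
--                 continue
--             try:
--                 output_document += input_text[int(sentence[-1]['start_char']):int(sentence[-1]['end_char'])]+' '
--             except IndexError:
--                 continue
--     else:
--         output_document += ' '
--     return output_document
-- ===== SOURCE B (Python) =====
-- List_of_Single_Word_Titles = ['agent', 'brother', 'cantor', 'captain', 'chairperson', 'chancellor', 'chef', 'chief', 'commissioner', 'dame', 'dean', 'deputy', 'detective', 'director', 'doctor', 'father', 'governor', 'judge', 'king', 'queen', 'prince', 'princess', 'czar', 'lady', 'laird', 'lieutenant', 'lord', 'madame', 'master', 'miss', 'officer', 'pastor', 'president', 'principal', 'professor', 'provost', 'rabbi', 'rector', 'regent', 'reverend', 'sensei', 'sheriff', 'sister', 'student', 'trainer', 'warden']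
--
-- def title_triwise_front_capper(NLP_Dict, input_text):
--     pieces = []
--     for sentence in NLP_Dict:
--         n = len(sentence)
--         if n < 2:
--             continue
--         for i in range(n):
--             word = sentence[i]
--             start, end = int(word['start_char']), int(word['end_char'])
--             chunk = input_text[start:end]
--             if (i + 3 <= n and word['text'] in List_of_Single_Word_Titles
--                     and sentence[i + 1]['text'] == 'of'
--                     and sentence[i + 2]['upos'] in ('PROPN', 'NOUN')):
--                 chunk = chunk.title()
--             if i + 1 < n:
--                 pieces.append(chunk + (int(sentence[i + 1]['start_char']) - end) * ' ')
--             else: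
--                 pieces.append(chunk + ' ')
--     pieces.append(' ')
--     return ''.join(pieces)
-- ===== Notes on version B (the rewrite author's own statement) =====
-- stated objective: simpler
-- what changed: Replaces A's tee/zip triwise sliding window plus the for-else block with try/except negative-index tail handling by a single index-based pass over each sentence that builds a list of pieces (title-casing word i only when i+3 <= n and the 'of PROPN/NOUN' pattern follows) joined at the end.
import Mathlib
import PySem

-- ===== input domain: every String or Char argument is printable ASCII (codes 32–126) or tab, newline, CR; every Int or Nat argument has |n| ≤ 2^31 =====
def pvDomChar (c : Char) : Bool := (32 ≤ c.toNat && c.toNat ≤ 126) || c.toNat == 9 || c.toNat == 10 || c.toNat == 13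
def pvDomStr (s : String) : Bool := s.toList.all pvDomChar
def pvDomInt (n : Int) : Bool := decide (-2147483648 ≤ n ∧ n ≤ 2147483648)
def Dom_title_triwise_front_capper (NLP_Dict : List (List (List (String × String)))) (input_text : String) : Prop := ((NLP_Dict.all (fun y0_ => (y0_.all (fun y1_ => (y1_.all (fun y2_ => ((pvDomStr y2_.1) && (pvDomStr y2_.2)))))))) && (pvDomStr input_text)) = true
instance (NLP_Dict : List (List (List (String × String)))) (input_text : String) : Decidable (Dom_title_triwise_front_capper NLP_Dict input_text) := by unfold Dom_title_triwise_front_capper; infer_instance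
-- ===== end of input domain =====

-- B replaces A's tee/zip triwise sliding window plus for-else/try-except tail block by one plain
-- index-based pass per sentence building a list of pieces that is joined at the end (objective: simpler).

-- shared ports of the Python primitives both versions use (dict lookup, int(), slicing, ' '*n, str.title)
def pvTitles : List String := ["agent", "brother", "cantor", "captain", "chairperson", "chancellor", "chef", "chief", "commissioner", "dame", "dean", "deputy", "detective", "director", "doctor", "father", "governor", "judge", "king", "queen", "prince", "princess", "czar", "lady", "laird", "lieutenant", "lord", "madame", "master", "miss", "officer", "pastor", "president", "principal", "professor", "provost", "rabbi", "rector", "regent", "reverend", "sensei", "sheriff", "sister", "student", "trainer", "warden"]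

def pvGetS (w : List (String × String)) (k : String) : Option String :=
  (w.find? (fun p => p.1 == k)).map (fun p => p.2)

-- int(w[k]); default 0 is only reached outside Pre_ (where the Python raises)
def pvGetInt (w : List (String × String)) (k : String) : Int :=
  ((pvGetS w k).bind PySem.Int.ofStr?).getD 0

def pvText (w : List (String × String)) : String := (pvGetS w "text").getD ""
def pvUpos (w : List (String × String)) : String := (pvGetS w "upos").getD ""

def pvSpaces (n : Int) : String := String.ofList (List.replicate n.toNat ' ')

def pvSlice (t : String) (a b : Int) : String := PySem.Str.slice t (some a) (some b)

-- str.title(), exact on ASCII: uppercase a letter after a non-letter, lowercase after a letter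
def pvTitle (s : String) : String :=
  String.ofList ((s.toList.foldl
    (fun (st : List Char × Bool) c =>
      ((if st.2 then PySem.Chars.lowerChar c else PySem.Chars.upperChar c) :: st.1,
       PySem.Chars.isalpha c)) ([], false)).1.reverse)

-- ===== PORT A =====
-- triwise: zip of the iterable with itself shifted by one and by two
def pvTriwise (s : List (List (String × String))) :
    List ((List (String × String)) × (List (String × String)) × (List (String × String))) :=
  ((s.zip s.tail).zip s.tail.tail).map (fun p => (p.1.1, p.1.2, p.2))

def pvWinPiece (t : String) (w1 w2 w3 : List (String × String)) : String :=
  let s1 := pvGetInt w1 "start_char"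
  let e1 := pvGetInt w1 "end_char"
  let loc := pvSlice t s1 e1
  let sp := pvSpaces (pvGetInt w2 "start_char" - e1)
  if pvText w1 ∈ pvTitles ∧ pvText w2 = "of" ∧ pvUpos w3 ∈ ["PROPN", "NOUN"] then
    pvTitle loc ++ sp
  else
    loc ++ sp

-- the for-else tail: sentence[-2] / sentence[-1]; none = IndexError caught by 'except: continue'
def pvTailA (t : String) (s : List (List (String × String))) (acc : String) : String :=
  match PySem.List.pyGet? s (-2) with
  | none => acc
  | some wA =>
    match PySem.List.pyGet? s (-1) with
    | none => acc
    | some wB =>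
      acc ++ pvSlice t (pvGetInt wA "start_char") (pvGetInt wA "end_char")
          ++ pvSpaces (pvGetInt wB "start_char" - pvGetInt wA "end_char")
          ++ pvSlice t (pvGetInt wB "start_char") (pvGetInt wB "end_char") ++ " "

def pvSentA (t : String) (acc : String) (s : List (List (String × String))) : String :=
  pvTailA t s ((pvTriwise s).foldl (fun a w => a ++ pvWinPiece t w.1 w.2.1 w.2.2) acc)

def title_triwise_front_capper (NLP_Dict : List (List (List (String × String)))) (input_text : String) : String :=
  (NLP_Dict.foldl (pvSentA input_text) "") ++ " "

-- ===== PORT B =====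
def pvPieceB (t : String) (s : List (List (String × String))) (n i : Nat) : String :=
  let w := s.getD i []
  let st := pvGetInt w "start_char"
  let en := pvGetInt w "end_char"
  let chunk := pvSlice t st en
  let chunk :=
    if i + 3 ≤ n ∧ pvText w ∈ pvTitles ∧ pvText (s.getD (i+1) []) = "of" ∧
        pvUpos (s.getD (i+2) []) ∈ ["PROPN", "NOUN"] then
      pvTitle chunk
    else chunk
  if i + 1 < n then chunk ++ pvSpaces (pvGetInt (s.getD (i+1) []) "start_char" - en)
  else chunk ++ " "

def title_triwise_front_capper_alt (NLP_Dict : List (List (List (String × String)))) (input_text : String) : String :=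
  let pieces := NLP_Dict.foldl
    (fun ps s =>
      let n := s.length
      if n < 2 then ps
      else ps ++ (List.range n).map (pvPieceB input_text s n)) ([] : List String)
  String.join (pieces ++ [" "])

-- ===== PRECONDITION & SPEC =====
-- Pre_ holds exactly where the Python A returns: in every sentence of length ≥ 2 all
-- 'start_char'/'end_char' values parse as int(), and along A's short-circuit the needed
-- 'text'/'upos' keys exist; shorter sentences need nothing (their IndexError is caught).
def pvIntOk (w : List (String × String)) (k : String) : Bool :=
  ((pvGetS w k).bind PySem.Int.ofStr?).isSome

def pvCapOk (s : List (List (String × String))) (n i : Nat) : Bool :=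
  !(decide (i + 3 ≤ n)) ||
  (match pvGetS (s.getD i []) "text" with
   | none => false
   | some tx =>
     !(pvTitles.contains tx) ||
     (match pvGetS (s.getD (i+1) []) "text" with
      | none => false
      | some tx2 => !(tx2 == "of") || (pvGetS (s.getD (i+2) []) "upos").isSome))

def pvSentOk (s : List (List (String × String))) : Bool :=
  decide (s.length < 2) ||
  (s.all (fun w => pvIntOk w "start_char" && pvIntOk w "end_char") &&
   (List.range s.length).all (fun i => pvCapOk s s.length i))

def Pre_title_triwise_front_capper (NLP_Dict : List (List (List (String × String)))) (_input_text : String) : Prop :=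
  NLP_Dict.all pvSentOk = true

instance (NLP_Dict : List (List (List (String × String)))) (input_text : String) : Decidable (Pre_title_triwise_front_capper NLP_Dict input_text) := by
  unfold Pre_title_triwise_front_capper; infer_instance

def pvWitness_title_triwise_front_capper : (List (List (List (String × String)))) × String :=
  ([[[("text", "king"), ("upos", "PROPN"), ("start_char", "0"), ("end_char", "4")],
     [("text", "of"), ("upos", "ADP"), ("start_char", "5"), ("end_char", "7")]]],
   "king of")

def Spec_title_triwise_front_capper (NLP_Dict : List (List (List (String × String)))) (input_text : String) (out : String) : Prop := out = title_triwise_front_capper_alt NLP_Dict input_text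
instance (NLP_Dict : List (List (List (String × String)))) (input_text : String) (out : String) : Decidable (Spec_title_triwise_front_capper NLP_Dict input_text out) := by unfold Spec_title_triwise_front_capper; infer_instance

-- ===== CLAIM (what is proved, stated in full; the proofs are below) =====
def Claim_equal_title_triwise_front_capper : Prop := ∀ (NLP_Dict : List (List (List (String × String)))) (input_text : String), Dom_title_triwise_front_capper NLP_Dict input_text → Pre_title_triwise_front_capper NLP_Dict input_text → Spec_title_triwise_front_capper NLP_Dict input_text (title_triwise_front_capper NLP_Dict input_text)

-- ===== LEMMAS AND PROOFS =====

-- common per-sentence value both ports compute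
def pvF (t : String) : List (List (String × String)) → String
  | w1 :: w2 :: w3 :: rest => pvWinPiece t w1 w2 w3 ++ pvF t (w2 :: w3 :: rest)
  | [a, b] =>
      pvSlice t (pvGetInt a "start_char") (pvGetInt a "end_char")
        ++ pvSpaces (pvGetInt b "start_char" - pvGetInt a "end_char")
        ++ pvSlice t (pvGetInt b "start_char") (pvGetInt b "end_char") ++ " "
  | _ => ""

theorem pvTriwise_cons (w1 w2 w3 : List (String × String)) (r : List (List (String × String))) :
    pvTriwise (w1 :: w2 :: w3 :: r) = (w1, w2, w3) :: pvTriwise (w2 :: w3 :: r) := by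
  simp [pvTriwise]

theorem join_cons (s : String) (l : List String) : String.join (s :: l) = s ++ String.join l := by
  have h : ∀ (l : List String) (a : String), l.foldl (· ++ ·) a = a ++ l.foldl (· ++ ·) "" := by
    intro l
    induction l with
    | nil => intro a; simp [List.foldl]
    | cons x xs ih => intro a; simp only [List.foldl]; rw [ih (a ++ x), ih ("" ++ x)]
                      simp [String.append_assoc]
  simp only [String.join, List.foldl]
  rw [h l ("" ++ s)]
  simp

theorem join_append (l1 l2 : List String) :
    String.join (l1 ++ l2) = String.join l1 ++ String.join l2 := by
  induction l1 with
  | nil => simp [String.join]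
  | cons x xs ih => simp only [List.cons_append, join_cons, ih, String.append_assoc]

theorem pvTailA_cons (t : String) (w1 : List (String × String))
    (T : List (List (String × String))) (h : 2 ≤ T.length) (acc : String) :
    pvTailA t (w1 :: T) acc = pvTailA t T acc := by
  have h2 : PySem.List.pyGet? (w1 :: T) (-2) = PySem.List.pyGet? T (-2) := by
    rw [PySem.List.pyGet?_neg_ofNat (w1 :: T) 2 (by omega) (by simp; omega),
        PySem.List.pyGet?_neg_ofNat T 2 (by omega) (by omega)]
    have : (w1 :: T).length - 2 = (T.length - 2) + 1 := by simp; omega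
    rw [this, List.getElem?_cons_succ]
  have h1 : PySem.List.pyGet? (w1 :: T) (-1) = PySem.List.pyGet? T (-1) := by
    rw [PySem.List.pyGet?_neg_one, PySem.List.pyGet?_neg_one]
    cases T with
    | nil => simp at h
    | cons x xs => simp [List.getLast?_cons_cons]
  simp only [pvTailA, h1, h2]

theorem pvSentA_eq_pvF (t : String) :
    ∀ (s : List (List (String × String))) (acc : String), pvSentA t acc s = acc ++ pvF t s
  | [], acc => by
      simp [pvSentA, pvTriwise, pvTailA, pvF, PySem.List.pyGet?, PySem.List.pyIdx?]
  | [a], acc => by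
      simp [pvSentA, pvTriwise, pvTailA, pvF, PySem.List.pyGet?, PySem.List.pyIdx?]
  | [a, b], acc => by
      simp [pvSentA, pvTriwise, pvTailA, pvF, PySem.List.pyGet?, PySem.List.pyIdx?,
        String.append_assoc]
  | w1 :: w2 :: w3 :: r, acc => by
      have ih := pvSentA_eq_pvF t (w2 :: w3 :: r) (acc ++ pvWinPiece t w1 w2 w3)
      simp only [pvSentA, pvTriwise_cons, List.foldl_cons] at ih ⊢
      rw [pvTailA_cons t w1 (w2 :: w3 :: r) (by simp) _]
      rw [ih]
      simp [pvF, String.append_assoc]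

theorem pvPieceB_shift (t : String) (w : List (String × String))
    (T : List (List (String × String))) (i : Nat) :
    pvPieceB t (w :: T) (T.length + 1) (i + 1) = pvPieceB t T T.length i := by
  have h3 : (i + 1 + 3 ≤ T.length + 1) = (i + 3 ≤ T.length) := by
    apply propext; omega
  have h1 : (i + 1 + 1 < T.length + 1) = (i + 1 < T.length) := by
    apply propext; omega
  have g0 : (w :: T).getD (i + 1) [] = T.getD i [] := by simp [List.getD]
  have g1 : (w :: T).getD (i + 1 + 1) [] = T.getD (i + 1) [] := by simp [List.getD]
  have g2 : (w :: T).getD (i + 1 + 2) [] = T.getD (i + 2) [] := by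
    have : i + 1 + 2 = (i + 2) + 1 := by omega
    rw [this]; simp [List.getD]
  simp only [pvPieceB, g0, g1, g2, h3, h1]

theorem pvPieceB_zero (t : String) (w1 w2 w3 : List (String × String))
    (r : List (List (String × String))) :
    pvPieceB t (w1 :: w2 :: w3 :: r) (r.length + 3) 0 = pvWinPiece t w1 w2 w3 := by
  have h3 : (0 + 3 ≤ r.length + 3) = True := by simp
  have h1 : (0 + 1 < r.length + 3) = True := by simp
  have gd0 : (w1 :: w2 :: w3 :: r).getD 0 [] = w1 := rfl
  have gd1 : (w1 :: w2 :: w3 :: r).getD (0 + 1) [] = w2 := rfl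
  have gd2 : (w1 :: w2 :: w3 :: r).getD (0 + 2) [] = w3 := rfl
  simp only [pvPieceB, pvWinPiece, h3, h1, true_and, if_true, gd0, gd1, gd2]
  split <;> rfl

theorem pvJoinB_eq_pvF (t : String) :
    ∀ (s : List (List (String × String))), 2 ≤ s.length →
      String.join ((List.range s.length).map (pvPieceB t s s.length)) = pvF t s
  | [], h => by simp at h
  | [a], h => by simp at h
  | [a, b], _ => by
      have hr : List.range ([a, b] : List (List (String × String))).length = [0, 1] := by
        simp only [List.length_cons, List.length_nil]
        decide
      rw [hr]
      simp only [List.map_cons, List.map_nil, String.join]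
      simp [pvPieceB, pvF, List.getD, String.append_assoc, List.foldl]
  | w1 :: w2 :: w3 :: r, _ => by
      have ih := pvJoinB_eq_pvF t (w2 :: w3 :: r) (by simp)
      have hlen : (w1 :: w2 :: w3 :: r).length = (w2 :: w3 :: r).length + 1 := by simp
      rw [hlen, List.range_succ_eq_map, List.map_cons, join_cons]
      have hshift : ((List.range (w2 :: w3 :: r).length).map Nat.succ).map
            (pvPieceB t (w1 :: w2 :: w3 :: r) ((w2 :: w3 :: r).length + 1))
          = (List.range (w2 :: w3 :: r).length).map
              (pvPieceB t (w2 :: w3 :: r) (w2 :: w3 :: r).length) := by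
        rw [List.map_map]
        apply List.map_congr_left
        intro i _
        show pvPieceB t (w1 :: w2 :: w3 :: r) ((w2 :: w3 :: r).length + 1) (i + 1) = _
        exact pvPieceB_shift t w1 (w2 :: w3 :: r) i
      rw [hshift, ih]
      have h0 : pvPieceB t (w1 :: w2 :: w3 :: r) ((w2 :: w3 :: r).length + 1) 0
          = pvWinPiece t w1 w2 w3 := by
        have : (w2 :: w3 :: r).length + 1 = r.length + 3 := by simp
        rw [this]; exact pvPieceB_zero t w1 w2 w3 r
      rw [h0]
      simp [pvF]

theorem pvF_short (t : String) (s : List (List (String × String))) (h : s.length < 2) :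
    pvF t s = "" := by
  match s, h with
  | [], _ => simp [pvF]
  | [a], _ => simp [pvF]

theorem foldA_eq (t : String) :
    ∀ (NLP : List (List (List (String × String)))) (acc : String),
      NLP.foldl (pvSentA t) acc = acc ++ String.join (NLP.map (pvF t)) := by
  intro NLP
  induction NLP with
  | nil => intro acc; simp [String.join]
  | cons s rest ih =>
      intro acc
      simp only [List.foldl_cons, List.map_cons, join_cons]
      rw [pvSentA_eq_pvF t s acc, ih, String.append_assoc]

theorem foldB_eq (t : String) :
    ∀ (NLP : List (List (List (String × String)))) (ps : List String),
      String.join (NLP.foldl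
        (fun ps s =>
          let n := s.length
          if n < 2 then ps
          else ps ++ (List.range n).map (pvPieceB t s n)) ps)
      = String.join ps ++ String.join (NLP.map (pvF t)) := by
  intro NLP
  induction NLP with
  | nil => intro ps; simp [String.join]
  | cons s rest ih =>
      intro ps
      simp only [List.foldl_cons, List.map_cons, join_cons]
      by_cases h : s.length < 2
      · simp only [h, if_pos]
        rw [ih, pvF_short t s h]
        simp
      · simp only [h, if_neg, not_false_iff]
        rw [ih, join_append, pvJoinB_eq_pvF t s (by omega), String.append_assoc]

theorem final_eq (t : String) (NLP : List (List (List (String × String)))) :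
    title_triwise_front_capper NLP t = title_triwise_front_capper_alt NLP t := by
  unfold title_triwise_front_capper title_triwise_front_capper_alt
  rw [join_append, foldB_eq t NLP [], foldA_eq t NLP ""]
  simp [String.join]

-- ===== VERDICT (by name: the statement is the Claim_ definition above) =====
theorem title_triwise_front_capper_spec : Claim_equal_title_triwise_front_capper := by
  intro NLP t _ _
  unfold Spec_title_triwise_front_capper
  exact final_eq t NLP
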